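-- pv_equiv track=rewrite | github.com/Nicldave/ADG | deal_scorer.py | _score_decision_maker
-- ===== SOURCE A (Python) =====
-- def _score_decision_maker(analysis: dict) -> tuple[float, list[str]]:
--     dms = analysis.get("decision_makers", [])
--     notes = []
--     if not dms:
--         notes.append("No decision-makers identified")
--         return 2, notes
--     influence_map = {"decision_maker": 12, "champion": 9, "evaluator": 5, "unknown": 2, "blocker": 0}
--     best_score = max(influence_map.get(dm.get("influence", "unknown"), 2) for dm in dms)
--     # Multiple senior attendees bonus: shows organizational buy-in
--     senior_count = sum(1 for dm in dms if dm.get("influence") in ("decision_maker", "champion"))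
--     if senior_count >= 2:
--         best_score = min(15, best_score + 3)
--         notes.append(f"{senior_count} senior stakeholders on call")
--     roles = [f"{dm.get('name', '?')} ({dm.get('influence', '?')})" for dm in dms]
--     notes.append(f"Decision makers: {', '.join(roles)}")
--     return min(15, best_score), notes
-- ===== SOURCE B (Python) =====
-- def _score_decision_maker(analysis: dict) -> tuple[float, list[str]]:
--     dms = analysis.get("decision_makers", [])
--     if not dms:
--         return 2, ["No decision-makers identified"]
--     # Histogram of influence values (one counting pass), then a priority ladder
--     # over the histogram instead of computing a score per attendee and taking max.
--     hist = {}
--     for dm in dms: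
--         inf = dm.get("influence")
--         hist[inf] = hist.get(inf, 0) + 1
--     senior = hist.get("decision_maker", 0) + hist.get("champion", 0)
--     if hist.get("decision_maker", 0):
--         best = 12
--     elif hist.get("champion", 0):
--         best = 9
--     elif hist.get("evaluator", 0):
--         best = 5
--     elif hist.get("blocker", 0) < len(dms):
--         best = 2  # someone with a missing/unknown/unrecognised influence is present
--     else:
--         best = 0  # everyone is a blocker
--     notes = []
--     if senior >= 2:
--         best = min(15, best + 3)
--         notes.append(f"{senior} senior stakeholders on call")
--     roles = [f"{dm.get('name', '?')} ({dm.get('influence', '?')})" for dm in dms]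
--     notes.append(f"Decision makers: {', '.join(roles)}")
--     return min(15, best), notes
-- ===== Notes on version B (the rewrite author's own statement) =====
-- stated objective: alternative
-- what changed: Instead of scoring every attendee and taking max plus a separate senior-count sum, B builds a histogram of influence values in one counting pass and then derives the score from a priority ladder over the histogram (decision_maker > champion > evaluator > non-blocker present > all blockers) and the senior count from two histogram lookups.
import Mathlib
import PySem

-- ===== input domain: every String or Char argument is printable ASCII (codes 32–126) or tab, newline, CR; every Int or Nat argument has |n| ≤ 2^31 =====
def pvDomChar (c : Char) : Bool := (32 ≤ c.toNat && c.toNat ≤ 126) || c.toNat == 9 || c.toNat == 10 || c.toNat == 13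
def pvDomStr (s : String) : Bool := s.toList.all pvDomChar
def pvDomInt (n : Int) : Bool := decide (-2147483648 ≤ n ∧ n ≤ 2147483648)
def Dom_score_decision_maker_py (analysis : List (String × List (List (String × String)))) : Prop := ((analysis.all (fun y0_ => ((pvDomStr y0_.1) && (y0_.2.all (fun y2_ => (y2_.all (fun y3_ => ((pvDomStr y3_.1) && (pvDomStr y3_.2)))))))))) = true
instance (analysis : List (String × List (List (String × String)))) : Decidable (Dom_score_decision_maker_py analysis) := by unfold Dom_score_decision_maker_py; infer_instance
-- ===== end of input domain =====

-- B replaces A's score-per-attendee-then-max computation by a histogram of influence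
-- values plus a priority ladder over the histogram (alternative algorithm, same cost).

-- ===== PORT A =====
def pvA_influenceMap : PySem.Dict String Int :=
  PySem.Dict.mk [("decision_maker", 12), ("champion", 9), ("evaluator", 5), ("unknown", 2), ("blocker", 0)]

def score_decision_maker_py (analysis : List (String × List (List (String × String)))) : Int × List String :=
  let dms := PySem.Dict.getD (PySem.Dict.mk analysis) "decision_makers" []
  if dms.isEmpty then (2, ["No decision-makers identified"])
  else
    let scores := dms.map (fun dm =>
      pvA_influenceMap.getD (PySem.Dict.getD (PySem.Dict.mk dm) "influence" "unknown") 2)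
    let best_score := match PySem.List.max? scores (fun y => y) with | some b => b | none => 0
    let senior_count : Int := dms.foldl (fun n dm =>
      let inf := PySem.Dict.get? (PySem.Dict.mk dm) "influence"
      if inf == some "decision_maker" || inf == some "champion" then n + 1 else n) 0
    let best_score := if senior_count ≥ 2 then min 15 (best_score + 3) else best_score
    let notes := (if senior_count ≥ 2 then [PySem.Int.toStr senior_count ++ " senior stakeholders on call"] else [])
    let roles := dms.map (fun dm =>
      PySem.Dict.getD (PySem.Dict.mk dm) "name" "?" ++ " (" ++ PySem.Dict.getD (PySem.Dict.mk dm) "influence" "?" ++ ")")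
    (min 15 best_score, notes ++ ["Decision makers: " ++ PySem.Str.join ", " roles])

-- ===== PORT B =====
def score_decision_maker_py_alt (analysis : List (String × List (List (String × String)))) : Int × List String :=
  let dms := PySem.Dict.getD (PySem.Dict.mk analysis) "decision_makers" []
  if dms.isEmpty then (2, ["No decision-makers identified"])
  else
    let hist : PySem.Dict (Option String) Int :=
      dms.foldl (fun h dm =>
        let inf := PySem.Dict.get? (PySem.Dict.mk dm) "influence"
        h.insert inf (h.getD inf 0 + 1)) PySem.Dict.empty
    let senior := hist.getD (some "decision_maker") 0 + hist.getD (some "champion") 0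
    let best : Int :=
      if hist.getD (some "decision_maker") 0 ≠ 0 then 12
      else if hist.getD (some "champion") 0 ≠ 0 then 9
      else if hist.getD (some "evaluator") 0 ≠ 0 then 5
      else if hist.getD (some "blocker") 0 < (dms.length : Int) then 2
      else 0
    let (best, notes) :=
      if senior ≥ 2 then (min 15 (best + 3), [PySem.Int.toStr senior ++ " senior stakeholders on call"])
      else (best, ([] : List String))
    let roles := dms.map (fun dm =>
      PySem.Dict.getD (PySem.Dict.mk dm) "name" "?" ++ " (" ++ PySem.Dict.getD (PySem.Dict.mk dm) "influence" "?" ++ ")")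
    (min 15 best, notes ++ ["Decision makers: " ++ PySem.Str.join ", " roles])

-- ===== PRECONDITION & SPEC =====
def Spec_score_decision_maker_py (analysis : List (String × List (List (String × String)))) (out : Int × List String) : Prop := out = score_decision_maker_py_alt analysis
instance (analysis : List (String × List (List (String × String)))) (out : Int × List String) : Decidable (Spec_score_decision_maker_py analysis out) := by unfold Spec_score_decision_maker_py; infer_instance

-- ===== CLAIM (what is proved, stated in full; the proofs are below) =====
def Claim_equal_score_decision_maker_py : Prop := ∀ (analysis : List (String × List (List (String × String)))), Dom_score_decision_maker_py analysis → Spec_score_decision_maker_py analysis (score_decision_maker_py analysis)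

-- ===== LEMMAS AND PROOFS =====

-- proof-side helpers: the influence of a dm, and its numeric score
def pvInf (dm : List (String × String)) : Option String :=
  PySem.Dict.get? (PySem.Dict.mk dm) "influence"

def pvSc (inf : Option String) : Int :=
  if inf = some "decision_maker" then 12
  else if inf = some "champion" then 9
  else if inf = some "evaluator" then 5
  else if inf = some "blocker" then 0
  else 2

-- A's per-dm score expression equals pvSc of the influence
theorem pvScore_agree (dm : List (String × String)) :
    pvA_influenceMap.getD (PySem.Dict.getD (PySem.Dict.mk dm) "influence" "unknown") 2
      = pvSc (pvInf dm) := by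
  unfold pvInf
  simp only [PySem.Dict.getD_eq_get?_getD]
  cases h : PySem.Dict.get? (PySem.Dict.mk dm) "influence" with
  | none => simp only [Option.getD_none]; decide
  | some s =>
    simp only [Option.getD_some]
    by_cases h1 : s = "decision_maker"
    · subst h1; decide
    by_cases h2 : s = "champion"
    · subst h2; decide
    by_cases h3 : s = "evaluator"
    · subst h3; decide
    by_cases h4 : s = "blocker"
    · subst h4; decide
    by_cases h5 : s = "unknown"
    · subst h5; decide
    have g1 : ("decision_maker" == s) = false := beq_eq_false_iff_ne.mpr fun e => h1 e.symm
    have g2 : ("champion" == s) = false := beq_eq_false_iff_ne.mpr fun e => h2 e.symm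
    have g3 : ("evaluator" == s) = false := beq_eq_false_iff_ne.mpr fun e => h3 e.symm
    have g4 : ("blocker" == s) = false := beq_eq_false_iff_ne.mpr fun e => h4 e.symm
    have g5 : ("unknown" == s) = false := beq_eq_false_iff_ne.mpr fun e => h5 e.symm
    simp [pvA_influenceMap, pvSc, PySem.Dict.get?, g1, g2, g3, g4, g5, h1, h2, h3, h4]

theorem pvSc_le_12 (inf : Option String) : pvSc inf ≤ 12 := by
  unfold pvSc; split_ifs <;> norm_num

-- senior count: countP of a disjunction of two distinct equalities = sum of counts
theorem pvCountP_or (L : List (Option String)) :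
    (L.countP (fun x => x == some "decision_maker" || x == some "champion") : Int)
      = (L.count (some "decision_maker") : Int) + (L.count (some "champion") : Int) := by
  induction L with
  | nil => simp
  | cons x xs ih =>
    by_cases h1 : x = some "decision_maker"
    · subst h1; simp [ih]; ring
    · by_cases h2 : x = some "champion"
      · subst h2; simp [ih]; ring
      · have b1 : (x == some "decision_maker") = false := beq_eq_false_iff_ne.mpr h1
        have b2 : (x == some "champion") = false := beq_eq_false_iff_ne.mpr h2
        simp [List.count_cons, ih, b1, b2]


-- score bounds used to pin down the max
theorem pvSc_le_9 (inf : Option String) (h : inf ≠ some "decision_maker") : pvSc inf ≤ 9 := by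
  unfold pvSc; rw [if_neg h]; split_ifs <;> norm_num

theorem pvSc_le_5 (inf : Option String) (h1 : inf ≠ some "decision_maker") (h2 : inf ≠ some "champion") : pvSc inf ≤ 5 := by
  unfold pvSc; rw [if_neg h1, if_neg h2]; split_ifs <;> norm_num

theorem pvSc_le_2 (inf : Option String) (h1 : inf ≠ some "decision_maker") (h2 : inf ≠ some "champion") (h3 : inf ≠ some "evaluator") : pvSc inf ≤ 2 := by
  unfold pvSc; rw [if_neg h1, if_neg h2, if_neg h3]; split_ifs <;> norm_num

theorem pvSc_eq_2 (inf : Option String) (h1 : inf ≠ some "decision_maker") (h2 : inf ≠ some "champion") (h3 : inf ≠ some "evaluator") (h4 : inf ≠ some "blocker") : pvSc inf = 2 := by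
  unfold pvSc; rw [if_neg h1, if_neg h2, if_neg h3, if_neg h4]

-- B's histogram lookup is the count of that influence value
theorem pvHist_getD (dms : List (List (String × String))) (k : Option String) :
    (dms.foldl (fun h dm =>
        let inf := PySem.Dict.get? (PySem.Dict.mk dm) "influence"
        h.insert inf (h.getD inf 0 + 1)) (PySem.Dict.empty : PySem.Dict (Option String) Int)).getD k 0
      = ((dms.map pvInf).count k : Int) := by
  have h := PySem.Dict.getD_foldl_insert_add_one (dms.map pvInf) (PySem.Dict.empty : PySem.Dict (Option String) Int) k
  rw [List.foldl_map] at h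
  simpa [pvInf, PySem.Dict.getD_empty] using h

-- A's senior fold is the sum of the two histogram counts
theorem pvSeniorA (dms : List (List (String × String))) :
    dms.foldl (fun n dm =>
        let inf := PySem.Dict.get? (PySem.Dict.mk dm) "influence"
        if inf == some "decision_maker" || inf == some "champion" then n + 1 else n) (0 : Int)
      = ((dms.map pvInf).count (some "decision_maker") : Int) + ((dms.map pvInf).count (some "champion") : Int) := by
  rw [← pvCountP_or]
  have hc : List.countP (fun x => x == some "decision_maker" || x == some "champion") (dms.map pvInf)
      = List.countP (fun dm => pvInf dm == some "decision_maker" || pvInf dm == some "champion") dms := by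
    induction dms with
    | nil => rfl
    | cons d ds ih => simp [List.countP_cons, ih]
  rw [hc]
  have h := PySem.List.foldl_if_add_one (l := dms)
    (p := fun dm => pvInf dm == some "decision_maker" || pvInf dm == some "champion") (a := (0 : Int))
  simpa [pvInf] using h

-- A's max over per-dm scores equals B's priority ladder over the histogram counts
theorem pvBestA (d : List (String × String)) (ds : List (List (String × String))) :
    (match PySem.List.max? (((d :: ds)).map (fun dm => pvSc (pvInf dm))) (fun y => y) with
      | some b => b | none => 0)
      = (if (((d :: ds).map pvInf).count (some "decision_maker") : Int) ≠ 0 then 12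
         else if (((d :: ds).map pvInf).count (some "champion") : Int) ≠ 0 then 9
         else if (((d :: ds).map pvInf).count (some "evaluator") : Int) ≠ 0 then 5
         else if (((d :: ds).map pvInf).count (some "blocker") : Int) < (((d :: ds)).length : Int) then 2
         else 0) := by
  set L : List (Option String) := (d :: ds).map pvInf with hL
  have hLne : L ≠ [] := by simp [hL]
  have hmapeq : (d :: ds).map (fun dm => pvSc (pvInf dm)) = L.map pvSc := by
    rw [hL, List.map_map]; rfl
  rw [hmapeq]
  obtain ⟨m, hm⟩ : ∃ m, PySem.List.max? (L.map pvSc) (fun y => y) = some m := by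
    cases h : PySem.List.max? (L.map pvSc) (fun y => y) with
    | none => exact absurd (by simpa using ((PySem.List.max?_eq_none_iff _ _).mp h)) hLne
    | some m => exact ⟨m, rfl⟩
  rw [hm]
  have hmem := PySem.List.max?_mem hm
  have hub : ∀ y ∈ L.map pvSc, y ≤ m := fun y hy => PySem.List.max?_isMax hm y hy
  obtain ⟨infm, hinfm, hms⟩ := List.mem_map.mp hmem
  subst hms
  simp only [ne_eq, Int.natCast_eq_zero, List.count_eq_zero, not_not]
  by_cases h1 : some "decision_maker" ∈ L
  · rw [if_pos (by simpa using h1)]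
    have h12 : (12 : Int) ≤ pvSc infm := by
      have : pvSc (some "decision_maker") ≤ pvSc infm := hub _ (List.mem_map_of_mem h1)
      simpa [pvSc] using this
    have := pvSc_le_12 infm; omega
  · rw [if_neg (by simpa using h1)]
    have n1 : infm ≠ some "decision_maker" := fun e => h1 (e ▸ hinfm)
    by_cases h2 : some "champion" ∈ L
    · rw [if_pos (by simpa using h2)]
      have h9 : (9 : Int) ≤ pvSc infm := by
        have : pvSc (some "champion") ≤ pvSc infm := hub _ (List.mem_map_of_mem h2)
        simpa [pvSc] using this
      have h9' : pvSc infm ≤ 9 := pvSc_le_9 infm n1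
      omega
    · rw [if_neg (by simpa using h2)]
      have n2 : infm ≠ some "champion" := fun e => h2 (e ▸ hinfm)
      by_cases h3 : some "evaluator" ∈ L
      · rw [if_pos (by simpa using h3)]
        have h5 : (5 : Int) ≤ pvSc infm := by
          have : pvSc (some "evaluator") ≤ pvSc infm := hub _ (List.mem_map_of_mem h3)
          simpa [pvSc] using this
        have h5' : pvSc infm ≤ 5 := pvSc_le_5 infm n1 n2
        omega
      · rw [if_neg (by simpa using h3)]
        have n3 : infm ≠ some "evaluator" := fun e => h3 (e ▸ hinfm)
        by_cases h4 : (L.count (some "blocker") : Int) < ((d :: ds).length : Int)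
        · rw [if_pos h4]
          have hlen : L.length = (d :: ds).length := by rw [hL, List.length_map]
          have hcl : L.count (some "blocker") < L.length := by
            rw [hlen]; exact_mod_cast h4
          have hex : ∃ b ∈ L, b ≠ some "blocker" := by
            by_contra hall
            simp only [not_exists, not_and, not_not] at hall
            have : L.count (some "blocker") = L.length :=
              List.count_eq_length.mpr (fun b hb => ((hall b hb).symm))
            omega
          obtain ⟨b, hbL, hbne⟩ := hex
          have nb1 : b ≠ some "decision_maker" := fun e => h1 (e ▸ hbL)
          have nb2 : b ≠ some "champion" := fun e => h2 (e ▸ hbL)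
          have nb3 : b ≠ some "evaluator" := fun e => h3 (e ▸ hbL)
          have h2le : (2 : Int) ≤ pvSc infm := by
            have := hub _ (List.mem_map_of_mem hbL)
            rw [pvSc_eq_2 b nb1 nb2 nb3 hbne] at this
            exact this
          have h2' : pvSc infm ≤ 2 := pvSc_le_2 infm n1 n2 n3
          omega
        · rw [if_neg h4]
          have hlen : L.length = (d :: ds).length := by rw [hL, List.length_map]
          have hco : L.count (some "blocker") = L.length := by
            have hle := List.count_le_length (a := some "blocker") (l := L)
            have : ¬ (L.count (some "blocker") < L.length) := by
              rw [hlen]; intro hlt; exact h4 (by exact_mod_cast hlt)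
            omega
          have hall := List.count_eq_length.mp hco
          have : infm = some "blocker" := (hall infm hinfm).symm
          rw [this]
          rfl

-- ===== VERDICT (by name: the statement is the Claim_ definition above) =====
theorem score_decision_maker_py_spec : Claim_equal_score_decision_maker_py := by
  intro analysis _
  unfold Spec_score_decision_maker_py score_decision_maker_py score_decision_maker_py_alt
  cases hdms : PySem.Dict.getD (PySem.Dict.mk analysis) "decision_makers" [] with
  | nil => simp
  | cons d ds =>
    simp only [List.isEmpty_cons, Bool.false_eq_true, if_false]
    simp only [pvHist_getD, pvSeniorA, pvScore_agree, pvBestA]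
    split_ifs <;> rfl
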